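-- pv_equiv track=rewrite | github.com/pypi-data/pypi-mirror-11 | packages/sqt/sqt-0.4.6.tar.gz/sqt-0.4.6/sqt/qualtrim.py | quality_trim_index
-- ===== SOURCE A (Python) =====
-- def quality_trim_index(qualities, cutoff, base=33):
-- 	"""
-- 	Find the position at which to trim a low-quality end from a nucleotide sequence.
--
-- 	Qualities are assumed to be ASCII-encoded as chr(qual + base).
--
-- 	The algorithm is the same as the one used by BWA within the function
-- 	'bwa_trim_read':
-- 	- Subtract the cutoff value from all qualities.
-- 	- Compute partial sums from all indices to the end of the sequence.
-- 	- Trim sequence at the index at which the sum is minimal.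
-- 	"""
-- 	s = 0
-- 	max_qual = 0
-- 	max_i = len(qualities)
-- 	for i in range(len(qualities)-1, -1, -1):
-- 		q = ord(qualities[i]) - base
-- 		s += cutoff - q
-- 		if s < 0:
-- 			break
-- 		if s > max_qual:
-- 			max_qual = s
-- 			max_i = i
-- 	return max_i
-- ===== SOURCE B (Python) =====
-- def quality_trim_index(qualities, cutoff, base=33):
--     """Pipeline decomposition: build the reversed partial-sum list, cut it at the
--     first negative sum, then locate the first maximum among the kept sums."""
--     n = len(qualities)
--     deltas = [cutoff - (ord(c) - base) for c in reversed(qualities)]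
--     sums = []
--     s = 0
--     for d in deltas:
--         s += d
--         sums.append(s)
--     valid = []
--     for s in sums:
--         if s < 0:
--             break
--         valid.append(s)
--     if not valid:
--         return n
--     m = max(valid)
--     if m <= 0:
--         return n
--     return n - 1 - valid.index(m)
-- ===== Notes on version B (the rewrite author's own statement) =====
-- stated objective: alternative
-- what changed: Replaced A's single fused backward loop with three running accumulators (sum, max, argmax) by a pipeline: materialise the reversed partial-sum list, truncate it at the first negative sum, then take max() and its first index and map that reversed index back.
import Mathlib
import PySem

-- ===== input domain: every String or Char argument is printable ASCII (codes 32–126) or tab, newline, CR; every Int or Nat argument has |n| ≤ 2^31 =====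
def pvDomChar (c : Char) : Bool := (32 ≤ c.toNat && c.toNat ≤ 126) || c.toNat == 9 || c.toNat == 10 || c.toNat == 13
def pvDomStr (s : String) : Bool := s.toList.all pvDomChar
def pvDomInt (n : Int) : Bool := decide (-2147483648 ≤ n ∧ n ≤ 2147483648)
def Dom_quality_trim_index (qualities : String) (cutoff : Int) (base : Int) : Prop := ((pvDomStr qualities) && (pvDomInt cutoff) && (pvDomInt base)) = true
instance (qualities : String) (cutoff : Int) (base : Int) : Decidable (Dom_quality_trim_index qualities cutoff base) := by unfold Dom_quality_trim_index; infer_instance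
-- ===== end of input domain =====

-- B is an alternative pipeline decomposition of A's fused backward loop (same O(n) cost);
-- equal return value on all inputs.

-- ===== PORT A =====
-- A's backward for-loop with break, carrying (s, max_qual, max_i)
def qtiLoopA (qs : List Char) (cutoff base : Int) : List Int → Int → Int → Int → Int
  | [], _, _, maxi => maxi
  | i :: rest, s, maxq, maxi =>
    let q : Int := ((PySem.List.pyGetD qs i 'A').toNat : Int) - base
    let s' := s + (cutoff - q)
    if s' < 0 then maxi
    else if maxq < s' then qtiLoopA qs cutoff base rest s' s' i
    else qtiLoopA qs cutoff base rest s' maxq maxi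

def quality_trim_index (qualities : String) (cutoff : Int) (base : Int) : Int :=
  let qs := qualities.toList
  qtiLoopA qs cutoff base (PySem.List.pyRange ((qs.length : Int) - 1) (-1) (-1)) 0 0 (qs.length : Int)

-- ===== PORT B =====
-- running partial sums of the deltas (the 'sums' loop of Source B)
def qtiSums : List Int → Int → List Int
  | [], _ => []
  | d :: rest, s => (s + d) :: qtiSums rest (s + d)

-- the 'valid' loop of Source B: keep sums up to (excluding) the first negative one
def qtiValid : List Int → List Int
  | [] => []
  | s :: rest => if s < 0 then [] else s :: qtiValid rest

def quality_trim_index_alt (qualities : String) (cutoff : Int) (base : Int) : Int :=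
  let qs := qualities.toList
  let n : Int := qs.length
  let deltas := qs.reverse.map (fun c => cutoff - ((c.toNat : Int) - base))
  let valid := qtiValid (qtiSums deltas 0)
  match PySem.List.max? valid (fun y => y) with
  | none => n
  | some m =>
    if m ≤ 0 then n
    else n - 1 - (((PySem.List.index? valid m).getD 0 : Nat) : Int)

-- ===== PRECONDITION & SPEC =====
def Spec_quality_trim_index (qualities : String) (cutoff : Int) (base : Int) (out : Int) : Prop := out = quality_trim_index_alt qualities cutoff base
instance (qualities : String) (cutoff : Int) (base : Int) (out : Int) : Decidable (Spec_quality_trim_index qualities cutoff base out) := by unfold Spec_quality_trim_index; infer_instance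

-- ===== CLAIM (what is proved, stated in full; the proofs are below) =====
def Claim_equal_quality_trim_index : Prop := ∀ (qualities : String) (cutoff : Int) (base : Int), Dom_quality_trim_index qualities cutoff base → Spec_quality_trim_index qualities cutoff base (quality_trim_index qualities cutoff base)

-- ===== LEMMAS AND PROOFS =====

-- index-free form of A's loop over the reversed character list, i = original index of the head
def qtiLoopP (cutoff base : Int) : List Char → Int → Int → Int → Int → Int
  | [], _, _, _, maxi => maxi
  | c :: rest, i, s, maxq, maxi =>
    let s' := s + (cutoff - (((c.toNat : Int)) - base))
    if s' < 0 then maxi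
    else if maxq < s' then qtiLoopP cutoff base rest (i-1) s' s' i
    else qtiLoopP cutoff base rest (i-1) s' maxq maxi

theorem qtiLoopA_eq_loopP (qs : List Char) (cutoff base : Int) :
    ∀ (k : Nat), k ≤ qs.length → ∀ (s maxq maxi : Int),
      qtiLoopA qs cutoff base (PySem.List.pyRange ((k : Int) - 1) (-1) (-1)) s maxq maxi
        = qtiLoopP cutoff base ((qs.take k).reverse) ((k : Int) - 1) s maxq maxi := by
  intro k
  induction k with
  | zero =>
    intro _ s maxq maxi
    rw [show ((0 : Nat) : Int) - 1 = (-1 : Int) by norm_num,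
        PySem.List.pyRange_neg_one_eq_nil (by norm_num)]
    simp [qtiLoopA, qtiLoopP]
  | succ k ih =>
    intro hk s maxq maxi
    have hk' : k < qs.length := hk
    have h1 : ((k + 1 : Nat) : Int) - 1 = (k : Int) := by push_cast; ring
    have hcons : PySem.List.pyRange ((k : Int)) (-1) (-1)
        = (k : Int) :: PySem.List.pyRange ((k : Int) - 1) (-1) (-1) :=
      PySem.List.pyRange_neg_one_cons (by omega)
    have hget : PySem.List.pyGetD qs ((k : Int)) 'A' = qs[k] := by
      rw [PySem.List.pyGetD_natCast, List.getD_eq_getElem?_getD, List.getElem?_eq_getElem hk']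
      rfl
    have htake : (qs.take (k + 1)).reverse = qs[k] :: (qs.take k).reverse := by
      rw [List.take_add_one, List.getElem?_eq_getElem hk']
      simp
    rw [h1, hcons, htake]
    simp only [qtiLoopA, qtiLoopP, hget]
    split_ifs
    · rfl
    · exact ih (Nat.le_of_lt hk') _ _ _
    · exact ih (Nat.le_of_lt hk') _ _ _

theorem foldl_max_init (l : List Int) : ∀ (a b : Int),
    l.foldl max (max a b) = max a (l.foldl max b) := by
  induction l with
  | nil => intro a b; simp
  | cons x t ih =>
    intro a b
    simp only [List.foldl_cons]
    rw [max_assoc, ih]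

theorem max?_int_cons (x : Int) (t : List Int) :
    PySem.List.max? (x :: t) (fun y => y) =
      some (match PySem.List.max? t (fun y => y) with
            | none => x
            | some m => max x m) := by
  cases t with
  | nil => simp [PySem.List.max?]
  | cons v vs =>
    rw [PySem.List.max?_id_cons, PySem.List.max?_id_cons]
    simp only [List.foldl_cons]
    rw [foldl_max_init]

theorem qti_max?_none {V : List Int} (h : PySem.List.max? V (fun y => y) = none) : V = [] := by
  cases V with
  | nil => rfl
  | cons v vs =>
    rw [PySem.List.max?_id_cons] at h
    exact absurd h (by simp)

theorem qtiLoopP_eq_pipeline (cutoff base : Int) :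
    ∀ (r : List Char) (i s maxq maxi : Int),
      qtiLoopP cutoff base r i s maxq maxi =
        (match PySem.List.max? (qtiValid (qtiSums (r.map (fun c => cutoff - ((c.toNat : Int) - base))) s)) (fun y => y) with
         | none => maxi
         | some m =>
           if m ≤ maxq then maxi
           else i - (((PySem.List.index? (qtiValid (qtiSums (r.map (fun c => cutoff - ((c.toNat : Int) - base))) s)) m).getD 0 : Nat) : Int)) := by
  intro r
  induction r with
  | nil =>
    intro i s maxq maxi
    simp [qtiLoopP, qtiSums, qtiValid, PySem.List.max?]
  | cons c rest ih =>
    intro i s maxq maxi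
    simp only [qtiLoopP, List.map_cons, qtiSums]
    by_cases hneg : s + (cutoff - ((c.toNat : Int) - base)) < 0
    · rw [if_pos hneg, show qtiValid ((s + (cutoff - ((c.toNat : Int) - base))) :: qtiSums (rest.map (fun c => cutoff - ((c.toNat : Int) - base))) (s + (cutoff - ((c.toNat : Int) - base)))) = [] from by simp [qtiValid, hneg]]
      simp [PySem.List.max?]
    · rw [if_neg hneg, ih, ih,
        show qtiValid ((s + (cutoff - ((c.toNat : Int) - base))) :: qtiSums (rest.map (fun c => cutoff - ((c.toNat : Int) - base))) (s + (cutoff - ((c.toNat : Int) - base)))) = (s + (cutoff - ((c.toNat : Int) - base))) :: qtiValid (qtiSums (rest.map (fun c => cutoff - ((c.toNat : Int) - base))) (s + (cutoff - ((c.toNat : Int) - base)))) from by simp [qtiValid, hneg]]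
      generalize hVg : qtiValid (qtiSums (rest.map (fun c => cutoff - ((c.toNat : Int) - base))) (s + (cutoff - ((c.toNat : Int) - base)))) = V
      generalize hsg : s + (cutoff - ((c.toNat : Int) - base)) = s'
      rw [max?_int_cons]
      rcases hM : PySem.List.max? V (fun y => y) with _ | m'
      · -- tail max is none: V = [], the running max is s' at reversed position 0
        have hVnil : V = [] := qti_max?_none hM
        subst hVnil
        simp only [PySem.List.index?_cons_self, Option.getD_some, Nat.cast_zero]
        split_ifs <;> first | omega | ring_nf
      · -- tail max is m': compare it with the head sum s'
        have hmem : m' ∈ V := PySem.List.max?_mem hM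
        obtain ⟨k, hk⟩ := Option.isSome_iff_exists.mp ((PySem.List.index?_isSome_iff V m').mpr hmem)
        simp only [hM]
        by_cases hle : m' ≤ s'
        · -- first maximum is s' itself, at reversed position 0
          rw [max_eq_left hle, PySem.List.index?_cons_self, hk]
          simp only [Option.getD_some, Nat.cast_zero]
          split_ifs <;> first | omega | ring_nf
        · -- first maximum is m', one position further along the reversed list
          have hlt : s' < m' := lt_of_not_ge hle
          rw [max_eq_right (le_of_lt hlt), PySem.List.index?_cons_of_ne _ (ne_of_lt hlt), hk]
          simp only [Option.map_some, Option.getD_some, Nat.cast_add, Nat.cast_one]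
          split_ifs <;> first | omega | ring_nf

-- ===== VERDICT (by name: the statement is the Claim_ definition above) =====
theorem quality_trim_index_spec : Claim_equal_quality_trim_index := by
  intro qualities cutoff base _
  unfold Spec_quality_trim_index quality_trim_index quality_trim_index_alt
  rw [qtiLoopA_eq_loopP qualities.toList cutoff base qualities.toList.length (le_refl _)]
  rw [List.take_length, qtiLoopP_eq_pipeline]
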